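-- pv_equiv track=rewrite | github.com/Madrawn/stable-diffusion-webui | scripts/test_my_prompt_custom_script.py | attention_action
-- ===== SOURCE A (Python) =====
-- def attention_action(separator, prompt_array, f, attention_strength):
--     if f >= 0:
--         new_prompt = separator.join(
--             [
--                 (
--                     f"({prompt_array[x]}:{attention_strength})"
--                     if x == f
--                     else prompt_array[x]
--                 )
--                 for x in range(len(prompt_array))
--             ]
--         )
--     else:
--         new_prompt = separator.join(prompt_array)
--     return new_prompt
-- ===== SOURCE B (Python) =====
-- def attention_action(separator, prompt_array, f, attention_strength):
--     if not (0 <= f < len(prompt_array)):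
--         return separator.join(prompt_array)
--     wrapped = f"({prompt_array[f]}:{attention_strength})"
--     pieces = []
--     if f > 0:
--         pieces.append(separator.join(prompt_array[:f]))
--     pieces.append(wrapped)
--     if f + 1 < len(prompt_array):
--         pieces.append(separator.join(prompt_array[f + 1:]))
--     return separator.join(pieces)
-- ===== Notes on version B (the rewrite author's own statement) =====
-- stated objective: alternative
-- what changed: Divide-and-conquer by slicing: instead of A's single join over a per-index conditional comprehension, B joins the slice before f and the slice after f separately and glues the (up to three) pieces - head-join, wrapped element, tail-join - with one final join.
import Mathlib
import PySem

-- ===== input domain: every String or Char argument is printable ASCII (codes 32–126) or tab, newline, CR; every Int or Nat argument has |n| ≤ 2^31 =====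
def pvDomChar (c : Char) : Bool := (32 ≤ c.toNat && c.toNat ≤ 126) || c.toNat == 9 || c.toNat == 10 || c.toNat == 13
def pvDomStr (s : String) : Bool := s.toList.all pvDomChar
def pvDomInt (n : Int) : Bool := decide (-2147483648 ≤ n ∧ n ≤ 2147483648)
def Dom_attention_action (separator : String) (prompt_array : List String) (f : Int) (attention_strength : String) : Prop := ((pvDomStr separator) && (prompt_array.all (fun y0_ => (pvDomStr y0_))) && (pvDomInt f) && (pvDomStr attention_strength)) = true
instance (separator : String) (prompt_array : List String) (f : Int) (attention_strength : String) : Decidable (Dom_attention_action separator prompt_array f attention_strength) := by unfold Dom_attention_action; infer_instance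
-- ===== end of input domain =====

-- B restructures the task as divide-and-conquer on slices: join the part before f and the part
-- after f separately and glue head-join, wrapped element and tail-join with one final join
-- (alternative decomposition; A maps an index-conditional over range(len) and joins once).

-- ===== PORT A =====
def attention_action (separator : String) (prompt_array : List String) (f : Int) (attention_strength : String) : String :=
  if f ≥ 0 then
    PySem.Str.join separator
      ((List.range prompt_array.length).map (fun (x : Nat) =>
        if (x : Int) = f then
          "(" ++ (PySem.List.pyGet? prompt_array (x : Int)).getD "" ++ ":" ++ attention_strength ++ ")"
        else (PySem.List.pyGet? prompt_array (x : Int)).getD ""))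
  else
    PySem.Str.join separator prompt_array

-- ===== PORT B =====
def attention_action_alt (separator : String) (prompt_array : List String) (f : Int) (attention_strength : String) : String :=
  if ¬ (0 ≤ f ∧ f < (prompt_array.length : Int)) then
    PySem.Str.join separator prompt_array
  else
    let wrapped := "(" ++ (PySem.List.pyGet? prompt_array f).getD "" ++ ":" ++ attention_strength ++ ")"
    let pieces :=
      (if 0 < f then [PySem.Str.join separator (PySem.List.slice prompt_array none (some f))] else [])
      ++ [wrapped]
      ++ (if f + 1 < (prompt_array.length : Int) then
            [PySem.Str.join separator (PySem.List.slice prompt_array (some (f + 1)) none)] else [])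
    PySem.Str.join separator pieces

-- ===== PRECONDITION & SPEC =====
def Spec_attention_action (separator : String) (prompt_array : List String) (f : Int) (attention_strength : String) (out : String) : Prop := out = attention_action_alt separator prompt_array f attention_strength
instance (separator : String) (prompt_array : List String) (f : Int) (attention_strength : String) (out : String) : Decidable (Spec_attention_action separator prompt_array f attention_strength out) := by unfold Spec_attention_action; infer_instance

-- ===== CLAIM (what is proved, stated in full; the proofs are below) =====
def Claim_equal_attention_action : Prop := ∀ (separator : String) (prompt_array : List String) (f : Int) (attention_strength : String), Dom_attention_action separator prompt_array f attention_strength → Spec_attention_action separator prompt_array f attention_strength (attention_action separator prompt_array f attention_strength)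

-- ===== LEMMAS AND PROOFS =====

-- A's conditional comprehension over range(len) is l.set f.toNat wrapped (identity when f ≥ len)
lemma map_range_eq_set (l : List String) (f : Int) (att : String) (hf : 0 ≤ f) :
    (List.range l.length).map (fun (x : Nat) =>
        if (x : Int) = f then
          "(" ++ (PySem.List.pyGet? l (x : Int)).getD "" ++ ":" ++ att ++ ")"
        else (PySem.List.pyGet? l (x : Int)).getD "") =
    (if 0 ≤ f ∧ f < l.length then
      l.set f.toNat ("(" ++ (PySem.List.pyGet? l f).getD "" ++ ":" ++ att ++ ")")
    else l) := by
  split_ifs with h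
  · obtain ⟨-, hlt⟩ := h
    apply List.ext_getElem
    · simp
    · intro i h1 h2
      have hi : i < l.length := by simpa using h1
      have hfl : f.toNat < l.length := by omega
      simp only [List.getElem_map, List.getElem_range, List.getElem_set]
      have hget : PySem.List.pyGet? l (i : Int) = some l[i] := by
        simp [hi]
      rw [hget]
      by_cases hif : (i : Int) = f
      · have hti : f.toNat = i := by omega
        rw [if_pos hif, if_pos hti, ← hif, hget]
      · have : f.toNat ≠ i := by omega
        rw [if_neg hif, if_neg this]
        rfl
  · apply List.ext_getElem
    · simp
    · intro i h1 h2
      have hi : i < l.length := by simpa using h1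
      have hne : (i : Int) ≠ f := by omega
      simp only [List.getElem_map, List.getElem_range]
      rw [if_neg hne]
      simp [hi]

-- intercalate over a cons with nonempty tail
lemma inter_cons (sep x : List Char) (ys : List (List Char)) (hy : ys ≠ []) :
    sep.intercalate (x :: ys) = x ++ sep ++ sep.intercalate ys := by
  cases ys with
  | nil => exact absurd rfl hy
  | cons y ys' => simp [List.intercalate, List.intersperse]

-- intercalate splits across an append of two nonempty groups
lemma inter_append (sep : List Char) (xs ys : List (List Char)) (hx : xs ≠ []) (hy : ys ≠ []) :
    sep.intercalate (xs ++ ys) = sep.intercalate xs ++ sep ++ sep.intercalate ys := by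
  induction xs with
  | nil => exact absurd rfl hx
  | cons x xs ih =>
    cases xs with
    | nil =>
      rw [List.singleton_append, inter_cons sep x ys hy]
      simp [List.intercalate]
    | cons x' xs' =>
      have hne : x' :: xs' ≠ [] := by simp
      rw [List.cons_append, inter_cons sep x _ (by simp),
          inter_cons sep x (x' :: xs') hne, ih hne]
      simp [List.append_assoc]

-- gluing: joining the (up to three) piece-joins equals joining the concatenated groups
lemma inter_glue (sep w : List Char) (T D : List (List Char)) :
    sep.intercalate ((if T ≠ [] then [sep.intercalate T] else []) ++ [w]
        ++ (if D ≠ [] then [sep.intercalate D] else []))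
    = sep.intercalate (T ++ [w] ++ D) := by
  by_cases hT : T = [] <;> by_cases hD : D = []
  · simp [hT, hD]
  · rw [if_neg (by simp [hT]), if_pos hD, hT]
    simp only [List.nil_append, List.cons_append]
    rw [inter_cons sep w [sep.intercalate D] (by simp), inter_cons sep w D hD]
    simp [List.intercalate]
  · rw [if_pos hT, if_neg (by simp [hD]), hD]
    simp only [List.nil_append, List.append_nil, List.cons_append]
    rw [inter_cons sep (sep.intercalate T) [w] (by simp),
        inter_append sep T [w] hT (by simp)]
  · rw [if_pos hT, if_pos hD]
    simp only [List.nil_append, List.cons_append, List.append_assoc]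
    rw [inter_cons sep (sep.intercalate T) (w :: [sep.intercalate D]) (by simp),
        inter_cons sep w [sep.intercalate D] (by simp),
        inter_append sep T (w :: D) hT (by simp),
        inter_cons sep w D hD]
    simp [List.intercalate, List.append_assoc]

-- B's toList bridge: Str.join reads as intercalate on the Chars side
lemma join_toList (sep : String) (xs : List String) :
    (PySem.Str.join sep xs).toList = (sep.toList).intercalate (xs.map String.toList) := by
  simp [PySem.Str.join, PySem.Chars.join]

-- ===== VERDICT (by name: the statement is the Claim_ definition above) =====
theorem attention_action_spec : Claim_equal_attention_action := by
  intro separator prompt_array f attention_strength _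
  unfold Spec_attention_action attention_action attention_action_alt
  by_cases hin : 0 ≤ f ∧ f < (prompt_array.length : Int)
  · -- in range
    conv_rhs => rw [if_neg (not_not.mpr hin)]
    conv_lhs => rw [if_pos (show f ≥ 0 by omega)]
    obtain ⟨hf0, hflt⟩ := hin
    rw [map_range_eq_set prompt_array f attention_strength hf0,
        if_pos ⟨hf0, hflt⟩, List.set_eq_take_append_cons_drop]
    set n := f.toNat with hn
    have hfn : f = (n : Int) := by omega
    have hnl : n < prompt_array.length := by omega
    rw [if_pos hnl, hfn]
    have hsl1 : PySem.List.slice prompt_array none (some (n : Int)) = prompt_array.take n :=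
      PySem.List.slice_to_natCast prompt_array n
    have hsl2 : PySem.List.slice prompt_array (some ((n : Int) + 1)) none = prompt_array.drop (n + 1) := by
      have h1 : ((n : Int) + 1) = ((n + 1 : Nat) : Int) := by push_cast; ring
      rw [h1, PySem.List.slice_from_natCast]
    rw [hsl1, hsl2]
    -- reduce both joins to the Chars side
    have hTne : (0 < (n : Int)) = ((prompt_array.take n).map String.toList ≠ []) := by
      simp only [eq_iff_iff, ne_eq, List.map_eq_nil_iff, List.take_eq_nil_iff]
      constructor
      · intro h hc
        rcases hc with h0 | hnil
        · omega
        · rw [hnil] at hnl; simp at hnl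
      · intro h
        by_contra hc
        exact h (Or.inl (by omega))
    have hDne : ((n : Int) + 1 < (prompt_array.length : Int)) = ((prompt_array.drop (n + 1)).map String.toList ≠ []) := by
      simp only [eq_iff_iff, ne_eq, List.map_eq_nil_iff, List.drop_eq_nil_iff]
      omega
    apply String.toList_injective
    rw [join_toList, join_toList]
    simp only [List.map_append, apply_ite (List.map String.toList), List.map_cons,
      List.map_nil, join_toList]
    simp only [hTne, hDne]
    have := inter_glue separator.toList
      ("(" ++ (PySem.List.pyGet? prompt_array ((n : Nat) : Int)).getD "" ++ ":" ++ attention_strength ++ ")").toList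
      ((prompt_array.take n).map String.toList) ((prompt_array.drop (n + 1)).map String.toList)
    simpa [List.append_assoc] using this.symm
  · -- out of range: either f < 0 or f ≥ len; both sides join prompt_array unchanged
    conv_rhs => rw [if_pos hin]
    by_cases hf : f ≥ 0
    · conv_lhs => rw [if_pos hf]
      rw [map_range_eq_set prompt_array f attention_strength hf, if_neg hin]
    · conv_lhs => rw [if_neg hf]
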